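-- pv_equiv track=rewrite | github.com/SNManja/TDA-2c2024 | Guia 1/Ex10.py | PilaCauta
-- ===== SOURCE A (Python) =====
-- def PilaCauta(w,s):
--     guardianes = [None for _ in range(len(w))]
--     lvl = 0
--     indices = [None for _ in range(len(w))]
--
--     #
--     def PCRec(sop, i):
--         if (i>=len(w) or (sop and sop < 0)):
--             return 0
--         elif(sop == None):
--             return max(PCRec(s[i],i+1)+1,PCRec(None, i+1))
--         else:
--             return max(PCRec(min(s[i],sop-w[i]),i+1)+1, PCRec(sop, i+1))
--     return PCRec(None, 0)
-- ===== SOURCE B (Python) =====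
-- # DP over "number of items stacked" keeping, per count, the best (largest,
-- # with "no constraint yet" as top) remaining support; O(n^2) instead of A's
-- # exponential branching.
--
-- _NO = object()  # sentinel: no pending placement candidate
--
--
-- def _alive(sop):
--     # a branch can still stack an item unless its support went negative
--     return sop is None or sop >= 0
--
--
-- def _step(sop, wi, si):
--     # remaining support after stacking an item of weight wi, support si
--     return si if sop is None else min(si, sop - wi)
--
--
-- def _best2(a, b):
--     # the larger remaining support; None (= no constraint yet) is the top
--     if a is None or b is None:
--         return None
--     return max(a, b)
--
--
-- def PilaCauta(w, s):
--     best = [None]  # best[k] = best remaining support with k items stacked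
--     for wi, si in zip(w, s):
--         nxt = []
--         carry = _NO
--         for sop in best:
--             nxt.append(sop if carry is _NO else _best2(sop, carry))
--             carry = _step(sop, wi, si) if _alive(sop) else _NO
--         if carry is not _NO:
--             nxt.append(carry)
--         best = nxt
--     return len(best) - 1
-- ===== Notes on version B (the rewrite author's own statement) =====
-- stated objective: faster
-- what changed: Replaces A's exponential take/skip recursion by an O(n^2) dynamic program over the number of stacked items that keeps, for each count, the single best (largest, with 'no constraint yet' on top) remaining support, justified by monotonicity of the value in the remaining support.
import Mathlib
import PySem

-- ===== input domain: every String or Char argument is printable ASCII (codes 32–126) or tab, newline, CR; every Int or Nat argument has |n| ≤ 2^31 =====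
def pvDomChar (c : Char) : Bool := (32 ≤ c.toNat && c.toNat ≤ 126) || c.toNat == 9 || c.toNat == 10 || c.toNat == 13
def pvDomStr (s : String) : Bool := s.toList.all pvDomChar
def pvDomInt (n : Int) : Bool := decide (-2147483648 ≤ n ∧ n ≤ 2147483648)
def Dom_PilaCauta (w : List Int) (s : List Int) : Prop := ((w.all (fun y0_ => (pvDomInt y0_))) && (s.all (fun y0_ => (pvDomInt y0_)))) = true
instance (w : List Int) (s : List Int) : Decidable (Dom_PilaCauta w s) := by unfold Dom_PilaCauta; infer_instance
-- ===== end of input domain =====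

-- B replaces A's exponential take/skip recursion by an O(n^2) DP over the number
-- of stacked items, keeping per count the best remaining support (objective: faster).

-- ===== PORT A =====
-- literal port of PCRec: sop = None ↦ none; 'sop and sop < 0' ↦ sop = some v with v < 0.
-- fuel is only a structural-termination guard: every call increments i, so with
-- fuel = w.length the i ≥ len(w) test always fires before fuel runs out.
def pvV (w s : List Int) : Nat → Option Int → Nat → Int
  | 0, _, _ => 0
  | fuel + 1, sop, i =>
    if w.length ≤ i then 0
    else
      match sop with
      | none => max (pvV w s fuel (some (s.getD i 0)) (i + 1) + 1) (pvV w s fuel none (i + 1))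
      | some v =>
          if v < 0 then 0
          else max (pvV w s fuel (some (min (s.getD i 0) (v - w.getD i 0))) (i + 1) + 1)
                   (pvV w s fuel (some v) (i + 1))

def PilaCauta (w : List Int) (s : List Int) : Int := pvV w s w.length none 0

-- ===== PORT B =====
def pvAlive : Option Int → Bool
  | none => true
  | some v => decide (0 ≤ v)

def pvStep (wi si : Int) : Option Int → Int
  | none => si
  | some v => min si (v - wi)

def pvBest2 : Option Int → Option Int → Option Int
  | none, _ => none
  | _, none => none
  | some a, some b => some (max a b)

-- carry : Option (Option Int) plays Source B's _NO sentinel (none = no pending candidate)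
def pvUpdate (wi si : Int) : Option (Option Int) → List (Option Int) → List (Option Int)
  | carry, [] => (match carry with | some c => [c] | none => [])
  | carry, sop :: rest =>
      (match carry with | some c => pvBest2 sop c | none => sop) ::
      pvUpdate wi si (if pvAlive sop then some (some (pvStep wi si sop)) else none) rest

def PilaCauta_alt (w : List Int) (s : List Int) : Int :=
  (((w.zip s).foldl (fun best p => pvUpdate p.1 p.2 none best) [none]).length : Int) - 1

-- ===== PRECONDITION & SPEC =====
-- Pre_ excludes exactly the inputs where A raises IndexError: PCRec reads s[i] for
-- every i < len(w), so A raises whenever s is shorter than w.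
def Pre_PilaCauta (w : List Int) (s : List Int) : Prop := w.length ≤ s.length
instance (w : List Int) (s : List Int) : Decidable (Pre_PilaCauta w s) := by unfold Pre_PilaCauta; infer_instance
def pvWitness_PilaCauta : List Int × List Int := ([2, 1], [3, 0])

def Spec_PilaCauta (w : List Int) (s : List Int) (out : Int) : Prop := out = PilaCauta_alt w s
instance (w : List Int) (s : List Int) (out : Int) : Decidable (Spec_PilaCauta w s out) := by unfold Spec_PilaCauta; infer_instance

-- ===== CLAIM (what is proved, stated in full; the proofs are below) =====
def Claim_equal_PilaCauta : Prop := ∀ (w : List Int) (s : List Int), Dom_PilaCauta w s → Pre_PilaCauta w s → Spec_PilaCauta w s (PilaCauta w s)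

-- ===== LEMMAS AND PROOFS =====

-- abstract version of A's recursion over the zipped suffix
def pvVal : List (Int × Int) → Option Int → Int
  | [], _ => 0
  | (_, si) :: rest, none => max (pvVal rest (some si) + 1) (pvVal rest none)
  | (wi, si) :: rest, some v =>
      if v < 0 then 0
      else max (pvVal rest (some (min si (v - wi))) + 1) (pvVal rest (some v))

-- running max of (index + value) over the dp list
def pvG (ps : List (Int × Int)) : List (Option Int) → Int → Int → Int
  | [], _, acc => acc
  | sop :: rest, k, acc => pvG ps rest (k + 1) (max acc (k + pvVal ps sop))

def pvLe : Option Int → Option Int → Prop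
  | _, none => True
  | none, some _ => False
  | some a, some b => a ≤ b

theorem pvVal_nonneg (ps : List (Int × Int)) (sop : Option Int) : 0 ≤ pvVal ps sop := by
  induction ps generalizing sop with
  | nil => simp [pvVal]
  | cons p rest ih =>
    obtain ⟨wi, si⟩ := p
    match sop with
    | none => simp only [pvVal]; have := ih (some si); omega
    | some v =>
      simp only [pvVal]
      split
      · omega
      · have := ih (some v); omega

theorem pvVal_mono (ps : List (Int × Int)) (a b : Option Int) (h : pvLe a b) :
    pvVal ps a ≤ pvVal ps b := by
  induction ps generalizing a b with
  | nil => simp [pvVal]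
  | cons p rest ih =>
    obtain ⟨wi, si⟩ := p
    match a, b with
    | none, none => exact le_refl _
    | some _, none =>
      rename_i x
      simp only [pvVal]
      split
      · have h1 := pvVal_nonneg rest (some si)
        have h2 := pvVal_nonneg rest (none : Option Int)
        omega
      · have h1 := ih (some (min si (x - wi))) (some si) (by simp [pvLe])
        have h2 := ih (some x) none (by simp [pvLe])
        omega
    | none, some _ => exact absurd h (by simp [pvLe])
    | some x, some y =>
      have hxy : x ≤ y := h
      simp only [pvVal]
      split
      · split
        · omega
        · have := pvVal_nonneg rest (some (min si (y - wi)))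
          have := pvVal_nonneg rest (some y)
          omega
      · rename_i hx
        rw [if_neg (by omega)]
        have h1 := ih (some (min si (x - wi))) (some (min si (y - wi))) (by simp [pvLe]; omega)
        have h2 := ih (some x) (some y) (by simpa [pvLe])
        omega

theorem pvVal_best2 (ps : List (Int × Int)) (a b : Option Int) :
    pvVal ps (pvBest2 a b) = max (pvVal ps a) (pvVal ps b) := by
  match a, b with
  | none, none => simp [pvBest2]
  | none, some y =>
    simp only [pvBest2]
    have := pvVal_mono ps (some y) none (by simp [pvLe])
    omega
  | some x, none =>
    simp only [pvBest2]
    have := pvVal_mono ps (some x) none (by simp [pvLe])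
    omega
  | some x, some y =>
    simp only [pvBest2]
    rcases le_total x y with h | h
    · rw [max_eq_right h]
      have := pvVal_mono ps (some x) (some y) (by simpa [pvLe])
      omega
    · rw [max_eq_left h]
      have := pvVal_mono ps (some y) (some x) (by simpa [pvLe])
      omega

theorem pvVal_dead (ps : List (Int × Int)) (v : Int) (hv : v < 0) :
    pvVal ps (some v) = 0 := by
  cases ps with
  | nil => simp [pvVal]
  | cons p rest => obtain ⟨wi, si⟩ := p; simp [pvVal, hv]

-- contribution of a pending carry
def pvCarryAcc (ps : List (Int × Int)) : Option (Option Int) → Int → Int → Int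
  | none, _, acc => acc
  | some c, k, acc => max acc (k + pvVal ps c)

-- the key exchange step: one pvUpdate pass realises one unfolding of pvVal
theorem pvUpdate_step (ps : List (Int × Int)) (wi si : Int) :
    ∀ (best : List (Option Int)) (carry : Option (Option Int)) (k acc : Int),
      pvG ps (pvUpdate wi si carry best) k acc
        = pvG ((wi, si) :: ps) best k (pvCarryAcc ps carry k acc) := by
  intro best
  induction best with
  | nil =>
    intro carry k acc
    cases carry with
    | none => simp [pvUpdate, pvG, pvCarryAcc]
    | some c => simp [pvUpdate, pvG, pvCarryAcc]
  | cons sop rest ih =>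
    intro carry k acc
    simp only [pvUpdate, pvG]
    rw [ih]
    congr 1
    -- goal: pvCarryAcc ps carry' (k+1) (max acc (k + pvVal ps head')) =
    --       max (pvCarryAcc ps carry k acc) (k + pvVal ((wi,si)::ps) sop)
    match sop with
    | none =>
      simp only [pvAlive, pvVal, if_true]
      cases carry with
      | none => simp only [pvCarryAcc, pvStep]; omega
      | some c =>
        simp only [pvCarryAcc, pvStep, pvVal_best2]
        have := pvVal_nonneg ps c
        omega
    | some v =>
      by_cases hv : v < 0
      · have ha : pvAlive (some v) = false := by simp [pvAlive]; try omega
        rw [ha]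
        simp only [if_false, Bool.false_eq_true]
        have hd : pvVal ((wi, si) :: ps) (some v) = 0 := pvVal_dead _ v hv
        have hd' : pvVal ps (some v) = 0 := pvVal_dead _ v hv
        cases carry with
        | none => simp only [pvCarryAcc, hd, hd']; try omega
        | some c =>
          simp only [pvCarryAcc, pvVal_best2, hd, hd']
          have := pvVal_nonneg ps c
          omega
      · have ha : pvAlive (some v) = true := by simp [pvAlive]; try omega
        rw [ha]
        simp only [if_true]
        have hu : pvVal ((wi, si) :: ps) (some v)
            = max (pvVal ps (some (min si (v - wi))) + 1) (pvVal ps (some v)) := by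
          simp [pvVal, hv]
        cases carry with
        | none => simp only [pvCarryAcc, pvStep, hu]; omega
        | some c =>
          simp only [pvCarryAcc, pvStep, pvVal_best2, hu]
          omega

theorem pvG_fold (ps : List (Int × Int)) :
    ∀ (best : List (Option Int)) (k acc : Int),
      pvG ps best k acc
        = pvG [] (ps.foldl (fun b p => pvUpdate p.1 p.2 none b) best) k acc := by
  induction ps with
  | nil => intro best k acc; rfl
  | cons p rest ih =>
    intro best k acc
    obtain ⟨wi, si⟩ := p
    rw [List.foldl_cons, ← ih]
    rw [pvUpdate_step rest wi si best none k acc]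
    rfl

theorem pvG_nil (best : List (Option Int)) : ∀ k acc,
    pvG [] best k acc = if best = [] then acc else max acc (k + (best.length : Int) - 1) := by
  induction best with
  | nil => intro k acc; simp [pvG]
  | cons sop rest ih =>
    intro k acc
    simp only [pvG, pvVal, ih]
    split
    · rename_i h
      subst h
      simp
      try omega
    · simp only [List.length_cons]
      push_cast
      omega

theorem pvUpdate_ne_nil (wi si : Int) (carry : Option (Option Int)) (best : List (Option Int))
    (h : best ≠ []) : pvUpdate wi si carry best ≠ [] := by
  cases best with
  | nil => exact absurd rfl h
  | cons a l => simp [pvUpdate]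

theorem pvFold_ne_nil (ps : List (Int × Int)) :
    ∀ best : List (Option Int), best ≠ [] →
      ps.foldl (fun b p => pvUpdate p.1 p.2 none b) best ≠ [] := by
  induction ps with
  | nil => intro best h; exact h
  | cons p rest ih =>
    intro best h
    exact ih _ (pvUpdate_ne_nil p.1 p.2 none best h)

-- bridge: the indexed port pvV equals pvVal on the zipped suffix
theorem pvV_eq_pvVal (w s : List Int) (hls : w.length ≤ s.length) :
    ∀ (fuel i : Nat) (sop : Option Int), w.length ≤ i + fuel →
      pvV w s fuel sop i = pvVal ((w.zip s).drop i) sop := by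
  intro fuel
  induction fuel with
  | zero =>
    intro i sop hfi
    have hdrop : (w.zip s).drop i = [] := by
      apply List.drop_eq_nil_of_le
      simp [List.length_zip]
      omega
    rw [hdrop]
    cases sop with
    | none => simp [pvV, pvVal]
    | some v => simp [pvV, pvVal]
  | succ fuel ih =>
    intro i sop hfi
    by_cases hi : w.length ≤ i
    · have hdrop : (w.zip s).drop i = [] := by
        apply List.drop_eq_nil_of_le
        simp [List.length_zip]
        omega
      rw [hdrop]
      simp only [pvV, hi, if_true]
      cases sop with
      | none => simp [pvVal]
      | some v => simp [pvVal]
    · have hiw : i < w.length := by omega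
      have his : i < s.length := by omega
      have hiz : i < (w.zip s).length := by simp [List.length_zip]; omega
      have hdrop : (w.zip s).drop i = (w[i], s[i]) :: (w.zip s).drop (i + 1) := by
        rw [List.drop_eq_getElem_cons hiz]
        congr 1
        simp [List.getElem_zip]
      have hw : w.getD i 0 = w[i] := by simp [List.getD_eq_getElem?_getD, List.getElem?_eq_getElem hiw]
      have hs : s.getD i 0 = s[i] := by simp [List.getD_eq_getElem?_getD, List.getElem?_eq_getElem his]
      have hrec : ∀ sop', pvV w s fuel sop' (i + 1) = pvVal ((w.zip s).drop (i + 1)) sop' := by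
        intro sop'
        exact ih (i + 1) sop' (by omega)
      simp only [pvV, hi, if_false]
      cases sop with
      | none =>
        rw [hdrop]
        simp only [pvVal, hrec, hs]
      | some v =>
        rw [hdrop]
        by_cases hv : v < 0
        · simp [pvVal, hv]
        · simp only [pvVal, if_neg hv, hrec, hs, hw]

-- ===== VERDICT (by name: the statement is the Claim_ definition above) =====
theorem PilaCauta_spec : Claim_equal_PilaCauta := by
  intro w s _hdom hpre
  unfold Spec_PilaCauta PilaCauta PilaCauta_alt
  have h1 : pvV w s w.length none 0 = pvVal (w.zip s) none := by
    have := pvV_eq_pvVal w s hpre w.length 0 none (by omega)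
    simpa using this
  have h2 : pvG (w.zip s) [none] 0 0 = pvVal (w.zip s) none := by
    simp only [pvG]
    have := pvVal_nonneg (w.zip s) none
    omega
  have h3 := pvG_fold (w.zip s) [none] 0 0
  have hne : (w.zip s).foldl (fun b p => pvUpdate p.1 p.2 none b) [none] ≠ [] :=
    pvFold_ne_nil (w.zip s) [none] (by simp)
  rw [pvG_nil _ 0 0, if_neg hne] at h3
  have hlen : 1 ≤ ((w.zip s).foldl (fun b p => pvUpdate p.1 p.2 none b) [none]).length := by
    cases hh : (w.zip s).foldl (fun b p => pvUpdate p.1 p.2 none b) [none] with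
    | nil => exact absurd hh hne
    | cons a l => simp
  rw [h1, ← h2, h3]
  have : (1 : Int) ≤ ((w.zip s).foldl (fun b p => pvUpdate p.1 p.2 none b) [none]).length := by
    exact_mod_cast hlen
  omega
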